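-- pv_equiv track=rewrite | github.com/yj-melissa/solved | 프로그래머스/2/42626. 더 맵게/더 맵게.py | solution
-- ===== SOURCE A (Python) =====
-- import heapq
--
-- def solution(scoville, K):
--     answer = 0
--     h = []
--
--     # heap에 스코빌 지수 추가
--     for s in scoville:
--         heapq.heappush(h, s)
--
--     # 음식 섞기
--     while True:
--         f = heapq.heappop(h)
--
--         if f >= K:       # 스코빌 제일 낮은 음식이 K 넘음
--             break
--
--         if len(h) == 0:     # 더이상 섞을 음식 없음
--             answer = -1
--             break
--
--         s = heapq.heappop(h)
--
--         new = f + (s * 2)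
--         heapq.heappush(h, new)
--         answer += 1
--
--
--
--     return answer
-- ===== SOURCE B (Python) =====
-- def solution(scoville, K):
--     # Two-queue algorithm: the original values, sorted once, are consumed from the
--     # front of arr; every mixed value f + s*2 is appended to q, which stays sorted
--     # because mixed values are produced in nondecreasing order. The overall minimum
--     # is therefore always the smaller of the two queue fronts: O(1) per step, no heap.
--     arr = sorted(scoville)
--     q = []
--     i = j = 0
--     answer = 0
--     while True:
--         # pop the global minimum (IndexError on empty input, like A's heappop)
--         if i < len(arr) and (j >= len(q) or arr[i] <= q[j]):
--             f = arr[i]; i += 1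
--         else:
--             f = q[j]; j += 1
--         if f >= K:
--             return answer
--         if (len(arr) - i) + (len(q) - j) == 0:
--             return -1
--         if i < len(arr) and (j >= len(q) or arr[i] <= q[j]):
--             s = arr[i]; i += 1
--         else:
--             s = q[j]; j += 1
--         q.append(f + s * 2)
--         answer += 1
-- ===== Notes on version B (the rewrite author's own statement) =====
-- stated objective: faster
-- what changed: Replaces the heap by the two-queue trick: sort the input once, append mixed values to a plain FIFO list that provably stays sorted (each new value f+2s is at least the previously produced one), and take each minimum as the smaller of the two queue fronts, so every merge step is O(1) pointer moves with no heap operation or ordered insertion.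
import Mathlib
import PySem

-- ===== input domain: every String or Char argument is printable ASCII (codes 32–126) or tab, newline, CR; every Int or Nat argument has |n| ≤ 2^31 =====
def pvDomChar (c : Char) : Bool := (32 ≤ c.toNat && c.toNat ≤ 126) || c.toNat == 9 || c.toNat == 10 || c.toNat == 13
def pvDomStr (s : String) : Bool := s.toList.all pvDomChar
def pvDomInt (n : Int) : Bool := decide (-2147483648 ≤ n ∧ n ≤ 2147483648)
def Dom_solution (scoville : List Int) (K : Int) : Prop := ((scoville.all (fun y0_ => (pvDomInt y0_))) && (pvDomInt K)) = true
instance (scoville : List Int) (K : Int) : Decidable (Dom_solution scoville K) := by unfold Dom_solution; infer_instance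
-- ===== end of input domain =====

-- B replaces A's binary heap by the two-queue algorithm: sort once, append mixed values
-- to a FIFO queue that stays sorted, pop each minimum as the smaller of the two queue
-- fronts (objective: alternative; on [] both Pythons raise IndexError, excluded by Pre_).

-- ===== PORT A =====
-- heapq.heappush / heappop are library calls, ported by their contract on Int values:
-- push adds the element, pop returns the minimum and removes one occurrence of it.
-- This is exact for the returned values: Int values carry no identity beyond their order.
def pyHeapPush (h : List Int) (x : Int) : List Int := h ++ [x]

def solutionLoop (K : Int) (h : List Int) (answer : Int) : Int :=
  match hm : h.min? with
  | none => answer   -- Python: heappop raises IndexError here; excluded by Pre_solution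
  | some f =>
    if f ≥ K then answer
    else if hr : h.erase f = [] then -1
    else
      match hs : (h.erase f).min? with
      | none => answer   -- unreachable: h.erase f ≠ []
      | some s => solutionLoop K (pyHeapPush (((h.erase f).erase s)) (f + s * 2)) (answer + 1)
  termination_by h.length
  decreasing_by
    have hfm : f ∈ h := List.min?_mem hm
    have hsm : s ∈ h.erase f := List.min?_mem hs
    have h1 : (h.erase f).length = h.length - 1 := List.length_erase_of_mem hfm
    have h2 : ((h.erase f).erase s).length = (h.erase f).length - 1 := List.length_erase_of_mem hsm
    have h3 : 0 < h.length := List.length_pos_of_mem hfm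
    have h4 : 0 < (h.erase f).length := List.length_pos_of_mem hsm
    simp [pyHeapPush, h2, h1]
    omega

def solution (scoville : List Int) (K : Int) : Int :=
  solutionLoop K (scoville.foldl pyHeapPush []) 0

-- ===== PORT B =====
-- pop2 is Source B's front-of-two-queues minimum pop: take arr's front when it exists and is
-- ≤ q's front, otherwise q's front; none = both queues exhausted (IndexError in Python).
def pop2 (xs q : List Int) : Option (Int × List Int × List Int) :=
  match xs, q with
  | [], [] => none
  | x :: xs', [] => some (x, xs', [])
  | [], y :: q' => some (y, [], q')
  | x :: xs', y :: q' => if x ≤ y then some (x, xs', y :: q') else some (y, x :: xs', q')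

theorem pop2_length {xs q : List Int} {f : Int} {xs1 q1 : List Int}
    (h : pop2 xs q = some (f, xs1, q1)) :
    xs1.length + q1.length + 1 = xs.length + q.length := by
  unfold pop2 at h
  cases xs with
  | nil =>
    cases q with
    | nil => cases h
    | cons y q' => simp at h; obtain ⟨rfl, rfl, rfl⟩ := h; simp
  | cons x xs' =>
    cases q with
    | nil => simp at h; obtain ⟨rfl, rfl, rfl⟩ := h; simp
    | cons y q' =>
      simp only at h
      split at h <;> simp at h <;> obtain ⟨rfl, rfl, rfl⟩ := h <;> simp <;> omega

def altLoop (K : Int) (xs q : List Int) (answer : Int) : Int :=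
  match hp : pop2 xs q with
  | none => answer   -- Python: q[j] raises IndexError here; excluded by Pre_solution
  | some (f, xs1, q1) =>
    if f ≥ K then answer
    else
      match hp2 : pop2 xs1 q1 with
      | none => -1
      | some (s, xs2, q2) => altLoop K xs2 (q2 ++ [f + s * 2]) (answer + 1)
  termination_by xs.length + q.length
  decreasing_by
    have h1 := pop2_length hp
    have h2 := pop2_length hp2
    simp
    omega

def solution_alt (scoville : List Int) (K : Int) : Int :=
  altLoop K (PySem.List.sorted scoville (fun x => x) false) [] 0

-- ===== PRECONDITION & SPEC =====
-- Pre_ excludes only the empty list, on which A (heappop) raises IndexError (B raises too).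
def Pre_solution (scoville : List Int) (K : Int) : Prop := scoville ≠ []
instance (scoville : List Int) (K : Int) : Decidable (Pre_solution scoville K) := by
  unfold Pre_solution; infer_instance
def pvWitness_solution : List Int × Int := ([1, 2, 3, 9, 10, 12], 7)

def Spec_solution (scoville : List Int) (K : Int) (out : Int) : Prop := out = solution_alt scoville K
instance (scoville : List Int) (K : Int) (out : Int) : Decidable (Spec_solution scoville K out) := by unfold Spec_solution; infer_instance

-- ===== CLAIM (what is proved, stated in full; the proofs are below) =====
def Claim_equal_solution : Prop := ∀ (scoville : List Int) (K : Int), Dom_solution scoville K → Pre_solution scoville K → Spec_solution scoville K (solution scoville K)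

-- ===== LEMMAS AND PROOFS =====

-- Canonical reference loop: one fully sorted list with ordered re-insertion; both ports
-- are proved equal to it.
def insortR (xs : List Int) (x : Int) : List Int :=
  match xs with
  | [] => [x]
  | y :: ys => if x < y then x :: y :: ys else y :: insortR ys x

theorem insortR_length (xs : List Int) (x : Int) :
    (insortR xs x).length = xs.length + 1 := by
  induction xs with
  | nil => simp [insortR]
  | cons y ys ih => simp [insortR]; split <;> simp [ih]

def sortLoop (K : Int) (arr : List Int) (answer : Int) : Int :=
  match arr with
  | [] => answer
  | f :: rest =>
    if f ≥ K then answer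
    else
      match rest with
      | [] => -1
      | s :: rest2 => sortLoop K (insortR rest2 (f + s * 2)) (answer + 1)
  termination_by arr.length
  decreasing_by simp [insortR_length]

theorem insortR_perm (xs : List Int) (x : Int) :
    (insortR xs x).Perm (x :: xs) := by
  induction xs with
  | nil => simp [insortR]
  | cons y ys ih =>
    simp only [insortR]
    split
    · exact List.Perm.refl _
    · exact (ih.cons y).trans (List.Perm.swap x y ys)

theorem insortR_sorted {xs : List Int} (x : Int)
    (h : xs.Pairwise (· ≤ ·)) : (insortR xs x).Pairwise (· ≤ ·) := by
  induction xs with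
  | nil => simp [insortR]
  | cons y ys ih =>
    rw [List.pairwise_cons] at h
    simp only [insortR]
    split
    · rename_i hlt
      refine List.pairwise_cons.mpr ⟨?_, List.pairwise_cons.mpr h⟩
      intro b hb
      rcases List.mem_cons.mp hb with hb | hb
      · subst hb; exact le_of_lt hlt
      · exact le_of_lt (lt_of_lt_of_le hlt (h.1 b hb))
    · rename_i hge
      refine List.pairwise_cons.mpr ⟨?_, ih h.2⟩
      intro b hb
      rcases List.mem_cons.mp ((insortR_perm ys x).mem_iff.mp hb) with rfl | hb
      · omega
      · exact h.1 b hb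

theorem foldl_pyHeapPush (l acc : List Int) :
    l.foldl pyHeapPush acc = acc ++ l := by
  induction l generalizing acc with
  | nil => simp
  | cons a l ih => simp [List.foldl, pyHeapPush, ih]

theorem solutionLoop_none {K : Int} {h : List Int} {answer : Int}
    (hm : h.min? = none) : solutionLoop K h answer = answer := by
  rw [solutionLoop.eq_def]
  split
  · rfl
  · rename_i f heq; rw [hm] at heq; cases heq

theorem solutionLoop_break {K : Int} {h : List Int} {answer f : Int}
    (hm : h.min? = some f) (hK : f ≥ K) : solutionLoop K h answer = answer := by
  rw [solutionLoop.eq_def]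
  split
  · rfl
  · rename_i f' heq
    rw [hm] at heq
    injection heq with heq
    subst heq
    rw [if_pos hK]

theorem solutionLoop_last {K : Int} {h : List Int} {answer f : Int}
    (hm : h.min? = some f) (hK : ¬ f ≥ K) (he : h.erase f = []) :
    solutionLoop K h answer = -1 := by
  rw [solutionLoop.eq_def]
  split
  · rename_i heq; rw [hm] at heq; cases heq
  · rename_i f' heq
    rw [hm] at heq
    injection heq with heq
    subst heq
    rw [if_neg hK, dif_pos he]

theorem solutionLoop_step {K : Int} {h : List Int} {answer f s : Int}
    (hm : h.min? = some f) (hK : ¬ f ≥ K) (he : ¬ h.erase f = [])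
    (hm2 : (h.erase f).min? = some s) :
    solutionLoop K h answer
      = solutionLoop K (pyHeapPush ((h.erase f).erase s) (f + s * 2)) (answer + 1) := by
  rw [solutionLoop.eq_def]
  split
  · rename_i heq; rw [hm] at heq; cases heq
  · rename_i f' heq
    rw [hm] at heq
    injection heq with heq
    subst heq
    rw [if_neg hK, dif_neg he]
    split
    · rename_i heq2; rw [hm2] at heq2; cases heq2
    · rename_i s' heq2
      rw [hm2] at heq2
      injection heq2 with heq2
      subst heq2
      rfl

theorem sortLoop_nil {K : Int} {answer : Int} :
    sortLoop K [] answer = answer := by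
  rw [sortLoop.eq_def]

theorem sortLoop_one {K : Int} {f answer : Int} :
    sortLoop K [f] answer = if f ≥ K then answer else -1 := by
  rw [sortLoop.eq_def]

theorem sortLoop_cons {K : Int} {f s : Int} {t2 : List Int} {answer : Int} :
    sortLoop K (f :: s :: t2) answer
      = if f ≥ K then answer
        else sortLoop K (insortR t2 (f + s * 2)) (answer + 1) := by
  rw [sortLoop.eq_def]

theorem loop_eq (K : Int) : ∀ (n : Nat) (h arr : List Int) (answer : Int),
    h.length ≤ n → h.Perm arr → arr.Pairwise (· ≤ ·) →
    solutionLoop K h answer = sortLoop K arr answer := by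
  intro n
  induction n with
  | zero =>
    intro h arr answer hlen hperm _
    have h0 : h = [] := List.length_eq_zero_iff.mp (Nat.le_zero.mp hlen)
    have a0 : arr = [] := (h0 ▸ hperm).symm.eq_nil
    subst h0; subst a0
    rw [solutionLoop_none (by simp), sortLoop_nil]
  | succ n ih =>
    intro h arr answer hlen hperm hsorted
    match arr with
    | [] =>
      have h0 : h = [] := hperm.eq_nil
      subst h0
      rw [solutionLoop_none (by simp), sortLoop_nil]
    | f :: t =>
      have hfh : f ∈ h := hperm.mem_iff.mpr List.mem_cons_self
      rw [List.pairwise_cons] at hsorted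
      have hmin : h.min? = some f := by
        rw [List.min?_eq_some_iff]
        refine ⟨hfh, ?_⟩
        intro b hb
        rcases List.mem_cons.mp (hperm.mem_iff.mp hb) with rfl | hb
        · exact le_refl _
        · exact hsorted.1 b hb
      have hrest : (h.erase f).Perm t := by
        have := hperm.erase f
        rwa [List.erase_cons_head] at this
      by_cases hK : f ≥ K
      · rw [solutionLoop_break hmin hK]
        match t with
        | [] => rw [sortLoop_one, if_pos hK]
        | s :: t2 => rw [sortLoop_cons, if_pos hK]
      · match t, hrest, hsorted with
        | [], hrest, _ =>
          have he : h.erase f = [] := hrest.eq_nil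
          rw [solutionLoop_last hmin hK he, sortLoop_one, if_neg hK]
        | s :: t2, hrest, hsorted =>
          have hne : ¬ (h.erase f = []) := by
            intro h0
            exact absurd (h0 ▸ hrest) (by simp)
          have hsm : s ∈ h.erase f := hrest.mem_iff.mpr List.mem_cons_self
          have hs2 : (s :: t2).Pairwise (· ≤ ·) := hsorted.2
          rw [List.pairwise_cons] at hs2
          have hmin2 : (h.erase f).min? = some s := by
            rw [List.min?_eq_some_iff]
            refine ⟨hsm, ?_⟩
            intro b hb
            rcases List.mem_cons.mp (hrest.mem_iff.mp hb) with rfl | hb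
            · exact le_refl _
            · exact hs2.1 b hb
          have hrest2 : ((h.erase f).erase s).Perm t2 := by
            have := hrest.erase s
            rwa [List.erase_cons_head] at this
          rw [solutionLoop_step hmin hK hne hmin2, sortLoop_cons, if_neg hK]
          have hperm' : (pyHeapPush ((h.erase f).erase s) (f + s * 2)).Perm
              (insortR t2 (f + s * 2)) := by
            unfold pyHeapPush
            refine (List.perm_append_singleton _ _).trans ?_
            exact ((hrest2.cons _).trans (insortR_perm t2 (f + s * 2)).symm)
          have hlen' : (pyHeapPush ((h.erase f).erase s) (f + s * 2)).length ≤ n := by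
            have e1 : h.length = t2.length + 2 := by
              rw [hperm.length_eq]; simp
            have e2 : ((h.erase f).erase s).length = t2.length := hrest2.length_eq
            simp only [pyHeapPush, List.length_append, List.length_cons, e2,
              List.length_nil]
            omega
          have hsorted' : (insortR t2 (f + s * 2)).Pairwise (· ≤ ·) :=
            insortR_sorted _ hs2.2
          exact ih _ _ _ hlen' hperm' hsorted'

-- ===== B side: two queues vs the canonical sorted loop =====

def mergeL : List Int → List Int → List Int
  | [], q => q
  | x :: xs, [] => x :: xs
  | x :: xs, y :: q => if x ≤ y then x :: mergeL xs (y :: q) else y :: mergeL (x :: xs) q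
  termination_by xs q => xs.length + q.length

theorem mergeL_nil_left (q : List Int) : mergeL [] q = q := by
  cases q <;> rw [mergeL.eq_def]

theorem mergeL_nil_right (xs : List Int) : mergeL xs [] = xs := by
  cases xs <;> rw [mergeL.eq_def]

theorem pop2_merge (xs q : List Int) :
    mergeL xs q = (match pop2 xs q with
      | none => []
      | some (f, a, b) => f :: mergeL a b) := by
  unfold pop2
  cases xs with
  | nil =>
    cases q with
    | nil => rw [mergeL.eq_def]
    | cons y q' => simp [mergeL_nil_left]
  | cons x xs' =>
    cases q with
    | nil => simp [mergeL_nil_right]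
    | cons y q' =>
      by_cases hxy : x ≤ y
      · rw [mergeL.eq_def]; simp [hxy]
      · rw [mergeL.eq_def]; simp [hxy]

theorem pop2_none {xs q : List Int} (h : pop2 xs q = none) : xs = [] ∧ q = [] := by
  unfold pop2 at h
  cases xs <;> cases q <;> simp_all
  split at h <;> simp_all

theorem pop2_cases {xs q : List Int} {f : Int} {xs1 q1 : List Int}
    (h : pop2 xs q = some (f, xs1, q1)) :
    (xs = f :: xs1 ∧ q1 = q) ∨ (q = f :: q1 ∧ xs1 = xs) := by
  unfold pop2 at h
  cases xs with
  | nil =>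
    cases q with
    | nil => cases h
    | cons y q' => simp at h; obtain ⟨rfl, rfl, rfl⟩ := h; right; exact ⟨rfl, rfl⟩
  | cons x xs' =>
    cases q with
    | nil => simp at h; obtain ⟨rfl, rfl, rfl⟩ := h; left; exact ⟨rfl, rfl⟩
    | cons y q' =>
      simp only at h
      split at h <;> simp at h <;> obtain ⟨rfl, rfl, rfl⟩ := h
      · left; exact ⟨rfl, rfl⟩
      · right; exact ⟨rfl, rfl⟩

theorem mergeL_perm : ∀ (n : Nat) (xs q : List Int), xs.length + q.length ≤ n →
    (mergeL xs q).Perm (xs ++ q) := by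
  intro n
  induction n with
  | zero =>
    intro xs q hlen
    have hx : xs = [] := List.length_eq_zero_iff.mp (by omega)
    have hq : q = [] := List.length_eq_zero_iff.mp (by omega)
    subst hx; subst hq
    simp [mergeL_nil_left]
  | succ n ih =>
    intro xs q hlen
    rw [pop2_merge]
    match hp : pop2 xs q with
    | none =>
      obtain ⟨h1, h2⟩ := pop2_none hp
      subst h1; subst h2; simp
    | some (f, a, b) =>
      have hlen2 := pop2_length hp
      have ih2 : (mergeL a b).Perm (a ++ b) := ih a b (by omega)
      rcases pop2_cases hp with ⟨rfl, rfl⟩ | ⟨rfl, rfl⟩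
      · simpa using ih2.cons f
      · exact (ih2.cons f).trans List.perm_middle.symm

theorem mergeL_mem {xs q : List Int} {x : Int} (h : x ∈ xs ++ q) : x ∈ mergeL xs q :=
  (mergeL_perm (xs.length + q.length) xs q le_rfl).mem_iff.mpr h

theorem mergeL_pairwise : ∀ (n : Nat) (xs q : List Int), xs.length + q.length ≤ n →
    xs.Pairwise (· ≤ ·) → q.Pairwise (· ≤ ·) → (mergeL xs q).Pairwise (· ≤ ·) := by
  intro n
  induction n with
  | zero =>
    intro xs q hlen _ _
    have hx : xs = [] := List.length_eq_zero_iff.mp (by omega)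
    have hq : q = [] := List.length_eq_zero_iff.mp (by omega)
    subst hx; subst hq
    simp [mergeL_nil_left]
  | succ n ih =>
    intro xs q hlen hxs hq
    rw [pop2_merge]
    match hp : pop2 xs q with
    | none => simp
    | some (f, a, b) =>
      have hlen2 := pop2_length hp
      rcases pop2_cases hp with ⟨rfl, rfl⟩ | ⟨rfl, rfl⟩
      · rw [List.pairwise_cons] at hxs
        refine List.pairwise_cons.mpr ⟨?_, ih a b (by omega) hxs.2 hq⟩
        intro x hx
        rcases List.mem_append.mp
            ((mergeL_perm (a.length + b.length) a b le_rfl).mem_iff.mp hx) with hx | hx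
        · exact hxs.1 x hx
        · -- x ∈ q; pop2 chose xs's head over q's head, so f ≤ q.head ≤ x
          cases b with
          | nil => cases hx
          | cons y b' =>
            have hfy : f ≤ y := by
              unfold pop2 at hp
              cases a with
              | nil => simp_all
              | cons a0 a' =>
                simp only at hp
                split at hp <;> simp_all
            rcases List.mem_cons.mp hx with rfl | hx
            · exact hfy
            · exact le_trans hfy ((List.pairwise_cons.mp hq).1 x hx)
      · rw [List.pairwise_cons] at hq
        refine List.pairwise_cons.mpr ⟨?_, ih a b (by omega) hxs hq.2⟩
        intro x hx
        rcases List.mem_append.mp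
            ((mergeL_perm (a.length + b.length) a b le_rfl).mem_iff.mp hx) with hx | hx
        · -- x ∈ xs; pop2 chose q's head over xs's head, so f < xs.head ≤ x
          cases a with
          | nil => cases hx
          | cons x0 a' =>
            have hfx : f ≤ x0 := by
              unfold pop2 at hp
              simp only at hp
              split at hp <;> simp at hp <;> obtain ⟨h1, h2, h3⟩ := hp <;> omega
            rcases List.mem_cons.mp hx with rfl | hx
            · exact hfx
            · exact le_trans hfx ((List.pairwise_cons.mp hxs).1 x hx)
        · exact hq.1 x hx

theorem insortR_all_le {q : List Int} {v : Int} (h : ∀ y ∈ q, y ≤ v) :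
    insortR q v = q ++ [v] := by
  induction q with
  | nil => simp [insortR]
  | cons y q' ih =>
    have hy : y ≤ v := h y List.mem_cons_self
    simp only [insortR]
    rw [if_neg (by omega)]
    simp [ih (fun z hz => h z (List.mem_cons_of_mem _ hz))]

theorem merge_snoc : ∀ (n : Nat) (xs q : List Int) (v : Int),
    xs.length + q.length ≤ n → (∀ y ∈ q, y ≤ v) →
    mergeL xs (q ++ [v]) = insortR (mergeL xs q) v := by
  intro n
  induction n with
  | zero =>
    intro xs q v hlen _
    have hx : xs = [] := List.length_eq_zero_iff.mp (by omega)
    have hq : q = [] := List.length_eq_zero_iff.mp (by omega)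
    subst hx; subst hq
    simp [mergeL_nil_left, insortR]
  | succ n ih =>
    intro xs q v hlen hq
    match xs, q with
    | [], q => simp only [mergeL_nil_left]; exact (insortR_all_le hq).symm
    | x :: xs', [] =>
      simp only [List.nil_append, mergeL_nil_right]
      rw [mergeL.eq_def]
      simp only [insortR]
      split
      · rename_i hxv
        rw [if_neg (by omega)]
        have := ih xs' [] v (by simp at hlen ⊢; omega) (by simp)
        simp only [List.nil_append, mergeL_nil_right] at this
        rw [this]
      · rename_i hxv
        rw [if_pos (by omega), mergeL_nil_right]
    | x :: xs', y :: q' =>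
      have hyv : y ≤ v := hq y List.mem_cons_self
      simp only [List.cons_append]
      rw [mergeL.eq_def]
      conv_rhs => rw [mergeL.eq_def]
      simp only
      split
      · rename_i hxy
        simp only [insortR]
        rw [if_neg (by omega)]
        have := ih xs' (y :: q') v (by simp at hlen ⊢; omega) hq
        simp only [List.cons_append] at this
        rw [this]
      · rename_i hxy
        simp only [insortR]
        rw [if_neg (by omega)]
        have := ih (x :: xs') q' v (by simp at hlen ⊢; omega)
          (fun z hz => hq z (List.mem_cons_of_mem _ hz))
        rw [this]

theorem altLoop_none {K : Int} {xs q : List Int} {answer : Int}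
    (h : pop2 xs q = none) : altLoop K xs q answer = answer := by
  rw [altLoop.eq_def]
  split
  · rfl
  · rename_i heq; rw [h] at heq; cases heq

theorem altLoop_break {K : Int} {xs q : List Int} {answer f : Int} {xs1 q1 : List Int}
    (h : pop2 xs q = some (f, xs1, q1)) (hK : f ≥ K) :
    altLoop K xs q answer = answer := by
  rw [altLoop.eq_def]
  split
  · rfl
  · rename_i t heq
    rw [h] at heq
    injection heq with heq
    simp only [Prod.mk.injEq] at heq
    obtain ⟨rfl, rfl, rfl⟩ := heq
    rw [if_pos hK]

theorem altLoop_last {K : Int} {xs q : List Int} {answer f : Int} {xs1 q1 : List Int}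
    (h : pop2 xs q = some (f, xs1, q1)) (hK : ¬ f ≥ K) (h2 : pop2 xs1 q1 = none) :
    altLoop K xs q answer = -1 := by
  rw [altLoop.eq_def]
  split
  · rename_i heq; rw [h] at heq; cases heq
  · rename_i t heq
    rw [h] at heq
    injection heq with heq
    simp only [Prod.mk.injEq] at heq
    obtain ⟨rfl, rfl, rfl⟩ := heq
    rw [if_neg hK]
    split
    · rfl
    · rename_i heq2; rw [h2] at heq2; cases heq2

theorem altLoop_step {K : Int} {xs q : List Int} {answer f s : Int}
    {xs1 q1 xs2 q2 : List Int}
    (h : pop2 xs q = some (f, xs1, q1)) (hK : ¬ f ≥ K)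
    (h2 : pop2 xs1 q1 = some (s, xs2, q2)) :
    altLoop K xs q answer = altLoop K xs2 (q2 ++ [f + s * 2]) (answer + 1) := by
  rw [altLoop.eq_def]
  split
  · rename_i heq; rw [h] at heq; cases heq
  · rename_i t heq
    rw [h] at heq
    injection heq with heq
    simp only [Prod.mk.injEq] at heq
    obtain ⟨rfl, rfl, rfl⟩ := heq
    rw [if_neg hK]
    split
    · rename_i heq2; rw [h2] at heq2; cases heq2
    · rename_i t2 heq2
      rw [h2] at heq2
      injection heq2 with heq2
      simp only [Prod.mk.injEq] at heq2
      obtain ⟨rfl, rfl, rfl⟩ := heq2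
      rfl

-- popping from xs and q = q' ++ [z]: either the last produced value z survives and the
-- popped element comes from xs or q' (with the rest of q' surviving), or q is just [z].
theorem pop_shape {xs q' : List Int} {z f : Int} {xs1 q1 : List Int}
    (hp : pop2 xs (q' ++ [z]) = some (f, xs1, q1)) :
    (∃ p, q1 = p ++ [z] ∧ (f ∈ xs ∨ f ∈ q') ∧ (∀ u ∈ p, u ∈ q'))
      ∨ (q1 = [] ∧ f = z ∧ xs1 = xs) := by
  rcases pop2_cases hp with ⟨rfl, rfl⟩ | ⟨heq, rfl⟩
  · exact Or.inl ⟨q', rfl, Or.inl List.mem_cons_self, fun u hu => hu⟩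
  · cases q' with
    | nil =>
      simp at heq
      refine Or.inr ⟨?_, ?_, rfl⟩ <;> simp_all
    | cons w q'' =>
      simp only [List.cons_append, List.cons.injEq] at heq
      obtain ⟨rfl, rfl⟩ := heq
      exact Or.inl ⟨q'', rfl, Or.inr List.mem_cons_self,
        fun u hu => List.mem_cons_of_mem _ hu⟩

theorem pop2_qnil {xs : List Int} {s : Int} {xs2 q2 : List Int}
    (h : pop2 xs [] = some (s, xs2, q2)) : q2 = [] := by
  cases xs with
  | nil => cases h
  | cons x xs' => simp [pop2] at h; exact h.2.2

-- the two-queue invariant: q is (empty or) q' ++ [z] where z = f0 + s0*2 is the most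
-- recently produced value, f0 ≤ s0 were the pair popped then, and every surviving
-- element (xs and the older queue entries q') is ≥ s0.
def QInv (xs q : List Int) : Prop :=
  q = [] ∨ ∃ (q' : List Int) (z f0 s0 : Int),
    q = q' ++ [z] ∧ f0 ≤ s0 ∧ z = f0 + s0 * 2 ∧ ∀ x ∈ xs ++ q', s0 ≤ x

theorem alt_eq_sort (K : Int) : ∀ (n : Nat) (xs q : List Int) (answer : Int),
    xs.length + q.length ≤ n →
    xs.Pairwise (· ≤ ·) → q.Pairwise (· ≤ ·) → QInv xs q →
    altLoop K xs q answer = sortLoop K (mergeL xs q) answer := by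
  intro n
  induction n with
  | zero =>
    intro xs q answer hlen _ _ _
    have hx : xs = [] := List.length_eq_zero_iff.mp (by omega)
    have hq : q = [] := List.length_eq_zero_iff.mp (by omega)
    subst hx; subst hq
    rw [altLoop_none rfl, mergeL_nil_right, sortLoop_nil]
  | succ n ih =>
    intro xs q answer hlen hxs hq hinv
    match hp : pop2 xs q with
    | none =>
      obtain ⟨h1, h2⟩ := pop2_none hp
      subst h1; subst h2
      rw [altLoop_none rfl, mergeL_nil_right, sortLoop_nil]
    | some (f, xs1, q1) =>
      have hm1 : mergeL xs q = f :: mergeL xs1 q1 := by rw [pop2_merge, hp]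
      by_cases hK : f ≥ K
      · rw [altLoop_break hp hK, hm1]
        match hmm : mergeL xs1 q1 with
        | [] => rw [sortLoop_one, if_pos hK]
        | s :: t2 => rw [sortLoop_cons, if_pos hK]
      · match hp2 : pop2 xs1 q1 with
        | none =>
          have hm2 : mergeL xs1 q1 = [] := by
            obtain ⟨h1, h2⟩ := pop2_none hp2
            subst h1; subst h2; exact mergeL_nil_left []
          rw [altLoop_last hp hK hp2, hm1, hm2, sortLoop_one, if_neg hK]
        | some (s, xs2, q2) =>
          have hm2 : mergeL xs1 q1 = s :: mergeL xs2 q2 := by rw [pop2_merge, hp2]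
          have hl1 := pop2_length hp
          have hl2 := pop2_length hp2
          -- sortedness of the merged list gives f ≤ s and s ≤ everything left
          have hmp : (mergeL xs q).Pairwise (· ≤ ·) :=
            mergeL_pairwise (xs.length + q.length) xs q le_rfl hxs hq
          rw [hm1, hm2] at hmp
          have hfs : f ≤ s := (List.pairwise_cons.mp hmp).1 s List.mem_cons_self
          have hsall : ∀ x ∈ xs2 ++ q2, s ≤ x := by
            intro x hx
            exact (List.pairwise_cons.mp (List.pairwise_cons.mp hmp).2).1 x (mergeL_mem hx)
          -- pairwise for the residual queues
          have hxs1 : xs1.Pairwise (· ≤ ·) ∧ q1.Pairwise (· ≤ ·) := by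
            rcases pop2_cases hp with ⟨he, rfl⟩ | ⟨he, rfl⟩
            · exact ⟨(List.pairwise_cons.mp (he ▸ hxs)).2, hq⟩
            · exact ⟨hxs, (List.pairwise_cons.mp (he ▸ hq)).2⟩
          have hxs2 : xs2.Pairwise (· ≤ ·) ∧ q2.Pairwise (· ≤ ·) := by
            rcases pop2_cases hp2 with ⟨he, rfl⟩ | ⟨he, rfl⟩
            · exact ⟨(List.pairwise_cons.mp (he ▸ hxs1.1)).2, hxs1.2⟩
            · exact ⟨hxs1.1, (List.pairwise_cons.mp (he ▸ hxs1.2)).2⟩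
          -- key fact: every element of q2 is ≤ the newly produced value f + s*2
          have hkey : ∀ y ∈ q2, y ≤ f + s * 2 := by
            intro y hy
            rcases hinv with hq0 | ⟨q', z, f0, s0, rfl, hf0s0, rfl, hbound⟩
            · -- q = []: then q1 = [] (pop from q impossible), then q2 = []
              subst hq0
              rcases pop2_cases hp with ⟨he, rfl⟩ | ⟨he, _⟩
              · rw [pop2_qnil hp2] at hy; cases hy
              · cases he
            · -- q = q' ++ [z]: use pop_shape for both pops
              have hzub : ∀ w ∈ q', w ≤ f0 + s0 * 2 := by
                rw [List.pairwise_append] at hq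
                intro w hw
                exact hq.2.2 w hw _ List.mem_cons_self
              rcases pop_shape hp with ⟨p1, rfl, hf, hsub1⟩ | ⟨hq10, _, _⟩
              · have hs0f : s0 ≤ f := by
                  rcases hf with hf | hf
                  · exact hbound f (List.mem_append.mpr (Or.inl hf))
                  · exact hbound f (List.mem_append.mpr (Or.inr hf))
                rcases pop_shape hp2 with ⟨p2, rfl, hs, hsub2⟩ | ⟨hq20, _, _⟩
                · have hs0s : s0 ≤ s := by
                    rcases hs with hs | hs
                    · -- s ∈ xs1 ⊆ xs
                      have hsxs : s ∈ xs := by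
                        rcases pop2_cases hp with ⟨he, _⟩ | ⟨_, rfl⟩
                        · exact he ▸ List.mem_cons_of_mem _ hs
                        · exact hs
                      exact hbound s (List.mem_append.mpr (Or.inl hsxs))
                    · exact hbound s (List.mem_append.mpr (Or.inr (hsub1 s hs)))
                  -- y ∈ p2 ++ [z]: y ≤ z = f0 + s0*2 ≤ 3*s0 ≤ f + s*2
                  have hyz : y ≤ f0 + s0 * 2 := by
                    rcases List.mem_append.mp hy with hy | hy
                    · exact hzub y (hsub1 y (hsub2 y hy))
                    · simp at hy; omega
                  omega
                · rw [hq20] at hy; cases hy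
              · rw [hq10] at hp2
                rw [pop2_qnil hp2] at hy; cases hy
          rw [altLoop_step hp hK hp2, hm1, hm2, sortLoop_cons, if_neg hK]
          rw [← merge_snoc (xs2.length + q2.length) xs2 q2 (f + s * 2) le_rfl hkey]
          refine ih xs2 (q2 ++ [f + s * 2]) (answer + 1) (by simp; omega) hxs2.1 ?_ ?_
          · rw [List.pairwise_append]
            exact ⟨hxs2.2, List.pairwise_singleton _ _,
              fun y hy w hw => by simp at hw; subst hw; exact hkey y hy⟩
          · exact Or.inr ⟨q2, f + s * 2, f, s, rfl, hfs, rfl, hsall⟩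

-- ===== VERDICT (by name: the statement is the Claim_ definition above) =====
theorem solution_spec : Claim_equal_solution := by
  intro scoville K _ _
  unfold Spec_solution solution solution_alt
  rw [foldl_pyHeapPush]
  simp only [List.nil_append]
  have h1 : solutionLoop K scoville 0
      = sortLoop K (PySem.List.sorted scoville (fun x => x) false) 0 := by
    refine loop_eq K scoville.length scoville _ 0 le_rfl ?_ ?_
    · exact (PySem.List.sorted_perm ..).symm
    · exact PySem.List.sorted_pairwise ..
  have h2 : altLoop K (PySem.List.sorted scoville (fun x => x) false) [] 0
      = sortLoop K (mergeL (PySem.List.sorted scoville (fun x => x) false) []) 0 := by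
    refine alt_eq_sort K ((PySem.List.sorted scoville (fun x => x) false).length)
      _ [] 0 (by simp) (PySem.List.sorted_pairwise ..) (by simp) (Or.inl rfl)
  rw [h1, h2, mergeL_nil_right]
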